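-- pv_equiv track=rewrite | github.com/Machine-Earning/CISIR | modules/training/ts_modeling.py | generate_slope_column_names
-- ===== SOURCE A (Python) =====
-- from typing import List, Union, Callable, Dict
--
-- def generate_slope_column_names(inputs_to_use: List[str], padding: bool = False) -> List[str]:
--     """
--     Generate slope column names for each input type based on the specified time steps, optionally including padding.
--
--     For each input type, this function generates column names for slopes calculated between
--     consecutive time steps. It includes slopes from 'tminus24' to 'tminus2', a special case
--     for the slope from 'tminus1' to 't', and optionally a padding slope at the beginning.
--
--     Parameters:
--     - inputs_to_use (List[str]): A list of input types for which to generate slope column names.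
--     - padding (bool): Whether to include an additional column name for padding at the beginning.
--
--     Returns:
--     - List[str]: A list of slope column names for all specified input types, including padding if specified.
--     """
--
--     slope_column_names = []
--     for input_type in inputs_to_use:
--         # Optionally add padding slope column name
--         if padding:
--             slope_column_names.append(f'{input_type}_slope_padding_to_tminus24')
--         # Slopes from tminus24 to tminus2
--         for i in range(24, 1, -1):
--             slope_column_names.append(f'{input_type}_slope_tminus{i}_to_tminus{i - 1}')
--         # Slope from tminus1 to t
--         slope_column_names.append(f'{input_type}_slope_tminus1_to_t')
--
--     return slope_column_names
-- ===== SOURCE B (Python) =====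
-- from typing import List
--
-- def generate_slope_column_names(inputs_to_use: List[str], padding: bool = False) -> List[str]:
--     cols = []
--     for input_type in inputs_to_use:
--         if padding:
--             cols.append(f'{input_type}_slope_padding_to_tminus24')
--         labels = ['tminus%d' % i for i in range(24, 0, -1)] + ['t']
--         cols.extend(f'{input_type}_slope_{a}_to_{b}' for a, b in zip(labels, labels[1:]))
--     return cols
-- ===== Notes on version B (the rewrite author's own statement) =====
-- stated objective: simpler
-- what changed: Replaces A's counted loop plus special-cased final 'tminus1_to_t' append with a single consecutive-pair traversal: build the ordered label list ['tminus24',...,'tminus1','t'] once and emit one slope name per adjacent pair via zip.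
import Mathlib
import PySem

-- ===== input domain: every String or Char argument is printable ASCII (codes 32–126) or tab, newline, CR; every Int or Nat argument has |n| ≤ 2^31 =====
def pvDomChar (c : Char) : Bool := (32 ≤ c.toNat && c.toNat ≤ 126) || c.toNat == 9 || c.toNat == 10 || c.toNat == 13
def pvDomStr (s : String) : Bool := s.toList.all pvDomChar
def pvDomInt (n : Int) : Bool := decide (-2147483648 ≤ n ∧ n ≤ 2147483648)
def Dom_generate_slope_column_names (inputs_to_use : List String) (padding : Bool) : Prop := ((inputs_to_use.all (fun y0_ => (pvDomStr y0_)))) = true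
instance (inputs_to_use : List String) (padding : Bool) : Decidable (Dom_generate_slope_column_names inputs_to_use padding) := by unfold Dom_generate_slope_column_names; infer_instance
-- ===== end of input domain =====

-- B replaces A's counted loop + special final case with one consecutive-pair (zip) traversal of an ordered label list; objective: simpler.


-- ===== PORT A =====
def generate_slope_column_names (inputs_to_use : List String) (padding : Bool) : List String :=
  inputs_to_use.foldl (fun acc input_type =>
    let acc := if padding then acc ++ [input_type ++ "_slope_padding_to_tminus24"] else acc
    let acc := (PySem.List.pyRange 24 1 (-1)).foldl (fun acc i =>
      acc ++ [input_type ++ "_slope_tminus" ++ PySem.Int.toStr i ++ "_to_tminus" ++ PySem.Int.toStr (i - 1)]) acc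
    acc ++ [input_type ++ "_slope_tminus1_to_t"]) []

-- ===== PORT B =====
def generate_slope_column_names_alt (inputs_to_use : List String) (padding : Bool) : List String :=
  inputs_to_use.flatMap (fun input_type =>
    let labels := ((PySem.List.pyRange 24 0 (-1)).map (fun i => "tminus" ++ PySem.Int.toStr i)) ++ ["t"]
    (if padding then [input_type ++ "_slope_padding_to_tminus24"] else []) ++
    (labels.zip labels.tail).map (fun p => input_type ++ "_slope_" ++ p.1 ++ "_to_" ++ p.2))

-- ===== PRECONDITION & SPEC =====
def Spec_generate_slope_column_names (inputs_to_use : List String) (padding : Bool) (out : List String) : Prop := out = generate_slope_column_names_alt inputs_to_use padding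
instance (inputs_to_use : List String) (padding : Bool) (out : List String) : Decidable (Spec_generate_slope_column_names inputs_to_use padding out) := by unfold Spec_generate_slope_column_names; infer_instance

-- ===== CLAIM (what is proved, stated in full; the proofs are below) =====
def Claim_equal_generate_slope_column_names : Prop := ∀ (inputs_to_use : List String) (padding : Bool), Dom_generate_slope_column_names inputs_to_use padding → Spec_generate_slope_column_names inputs_to_use padding (generate_slope_column_names inputs_to_use padding)

-- ===== LEMMAS AND PROOFS =====
theorem pv_foldA (padding : Bool) (l : List String) (acc : List String) :
    l.foldl (fun acc input_type =>
      (if padding then acc ++ [input_type ++ "_slope_padding_to_tminus24"] else acc)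
        |> (fun acc => (PySem.List.pyRange 24 1 (-1)).foldl (fun acc i =>
              acc ++ [input_type ++ "_slope_tminus" ++ PySem.Int.toStr i ++ "_to_tminus" ++ PySem.Int.toStr (i - 1)]) acc)
        |> (fun acc => acc ++ [input_type ++ "_slope_tminus1_to_t"])) acc
      = acc ++ generate_slope_column_names_alt l padding := by
  induction l generalizing acc with
  | nil => simp [generate_slope_column_names_alt]
  | cons s t ih =>
    rw [List.foldl_cons, ih]
    have h1 : PySem.List.pyRange 24 1 (-1) = [24,23,22,21,20,19,18,17,16,15,14,13,12,11,10,9,8,7,6,5,4,3,2] := by decide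
    have h2 : PySem.List.pyRange 24 0 (-1) = [24,23,22,21,20,19,18,17,16,15,14,13,12,11,10,9,8,7,6,5,4,3,2,1] := by decide
    cases padding <;>
      (simp [generate_slope_column_names_alt, h1, h2, List.foldl, String.append_assoc]; decide)


-- ===== VERDICT (by name: the statement is the Claim_ definition above) =====
theorem generate_slope_column_names_spec : Claim_equal_generate_slope_column_names := by
  intro inputs_to_use padding _
  unfold Spec_generate_slope_column_names generate_slope_column_names
  exact pv_foldA padding inputs_to_use []
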